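-- pv_equiv track=rewrite | github.com/mahdiyyeh/BugNoir | backend/services/value_tracker.py | _idiom_detection_score
-- ===== SOURCE A (Python) =====
-- _IDIOM_PATTERNS = (
--     "piece of cake", "break a leg", "hit the road", "cost an arm", "once in a blue moon",
--     "coup de", "n\'importe quoi", "bof", "trop", "genre", "grave", "kiffer", "truc",
--     "machin", "bagnole", "bouffer", "kif", "wesh", "inchallah", "wallah", "yallah",
--     "inshallah", "habibi", "chouia", "b'slama", "safi", "zwin", "daba", "daba",
--     "bghiti", "kayen", "ma3andich", "allah", "bizarre", "dingue", "chelou",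
-- )
--
-- def _idiom_detection_score(text: str) -> int:
--     """0–2 points if idiom/colloquial markers detected."""
--     if not text:
--         return 0
--     t = text.lower()
--     for phrase in _IDIOM_PATTERNS:
--         if phrase in t:
--             return 2
--     return 0
-- ===== SOURCE B (Python) =====
-- _IDIOM_PATTERNS = (
--     "piece of cake", "break a leg", "hit the road", "cost an arm", "once in a blue moon",
--     "coup de", "n\'importe quoi", "bof", "trop", "genre", "grave", "kiffer", "truc",
--     "machin", "bagnole", "bouffer", "kif", "wesh", "inchallah", "wallah", "yallah",
--     "inshallah", "habibi", "chouia", "b'slama", "safi", "zwin", "daba", "daba",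
--     "bghiti", "kayen", "ma3andich", "allah", "bizarre", "dingue", "chelou",
-- )
--
-- def _idiom_detection_score(text: str) -> int:
--     """0–2 points if idiom/colloquial markers detected."""
--     if not text:
--         return 0
--     t = text.lower()
--     # single left-to-right pass over positions; at each position test whether
--     # some phrase begins exactly there
--     for i in range(len(t)):
--         if any(t.startswith(p, i) for p in _IDIOM_PATTERNS):
--             return 2
--     return 0
-- ===== Notes on version B (the rewrite author's own statement) =====
-- stated objective: alternative
-- what changed: A iterates over the phrase list running a fresh substring scan of the text for each phrase; B makes a single left-to-right pass over the text positions and at each position checks whether any phrase starts there (loop inversion, the scan over the text is done once).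
import Mathlib
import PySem

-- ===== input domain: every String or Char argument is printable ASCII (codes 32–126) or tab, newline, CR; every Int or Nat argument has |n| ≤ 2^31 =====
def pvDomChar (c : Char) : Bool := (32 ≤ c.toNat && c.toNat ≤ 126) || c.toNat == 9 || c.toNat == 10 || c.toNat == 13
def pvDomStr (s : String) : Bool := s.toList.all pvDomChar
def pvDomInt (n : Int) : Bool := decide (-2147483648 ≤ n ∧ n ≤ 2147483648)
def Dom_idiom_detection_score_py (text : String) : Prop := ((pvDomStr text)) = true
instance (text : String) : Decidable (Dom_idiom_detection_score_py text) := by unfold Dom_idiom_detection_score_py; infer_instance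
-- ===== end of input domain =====

-- B replaces A's per-phrase substring scans by a single left-to-right pass over the
-- text positions, checking at each position whether some phrase starts there
-- (objective: alternative).

-- the shared module-level constant _IDIOM_PATTERNS
def idiomPatterns : List String :=
  ["piece of cake", "break a leg", "hit the road", "cost an arm", "once in a blue moon",
   "coup de", "n'importe quoi", "bof", "trop", "genre", "grave", "kiffer", "truc",
   "machin", "bagnole", "bouffer", "kif", "wesh", "inchallah", "wallah", "yallah",
   "inshallah", "habibi", "chouia", "b'slama", "safi", "zwin", "daba", "daba",
   "bghiti", "kayen", "ma3andich", "allah", "bizarre", "dingue", "chelou"]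

-- ===== PORT A =====
-- the 'for phrase in _IDIOM_PATTERNS: if phrase in t: return 2' loop
def idiomLoopA : List String → String → Int
  | [], _ => 0
  | p :: ps, t => if PySem.Str.isIn p t then 2 else idiomLoopA ps t

def idiom_detection_score_py (text : String) : Int :=
  if text == "" then 0
  else idiomLoopA idiomPatterns (PySem.Str.lower text)

-- ===== PORT B =====
-- 'for i in range(len(t)): if any(t.startswith(p, i) for p in _IDIOM_PATTERNS): return 2'
-- as recursion over the suffixes of t (position i ↦ suffix from i); t.startswith(p, i)
-- is exactly 'p.toList is a prefix of the suffix at i'.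
def idiomScanB : List Char → Bool
  | [] => false
  | c :: rest => idiomPatterns.any (fun p => p.toList.isPrefixOf (c :: rest)) || idiomScanB rest

def idiom_detection_score_py_alt (text : String) : Int :=
  if text == "" then 0
  else if idiomScanB (PySem.Str.lower text).toList then 2 else 0

-- ===== PRECONDITION & SPEC =====
def Spec_idiom_detection_score_py (text : String) (out : Int) : Prop := out = idiom_detection_score_py_alt text
instance (text : String) (out : Int) : Decidable (Spec_idiom_detection_score_py text out) := by unfold Spec_idiom_detection_score_py; infer_instance

-- ===== CLAIM (what is proved, stated in full; the proofs are below) =====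
def Claim_equal_idiom_detection_score_py : Prop := ∀ (text : String), Dom_idiom_detection_score_py text → Spec_idiom_detection_score_py text (idiom_detection_score_py text)

-- ===== LEMMAS AND PROOFS =====

-- A's early-return loop equals the 'any phrase is a substring' test
theorem idiomLoopA_eq (ps : List String) (t : String) :
    idiomLoopA ps t = if ps.any (fun p => PySem.Str.isIn p t) then 2 else 0 := by
  induction ps with
  | nil => simp [idiomLoopA]
  | cons p ps ih =>
    by_cases h : PySem.Str.isIn p t = true
    · simp only [idiomLoopA, h, if_true, List.any_cons, Bool.true_or]
    · have hf : PySem.Str.isIn p t = false := by simpa using h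
      simp only [idiomLoopA, hf, Bool.false_eq_true, if_false, List.any_cons, Bool.false_or, ih]

-- every idiom pattern is a nonempty string
theorem idiomPatterns_ne_nil : ∀ p ∈ idiomPatterns, p.toList ≠ [] := by decide

-- B's positional scan finds exactly the pattern-as-infix occurrences
theorem idiomScanB_iff (cs : List Char) :
    idiomScanB cs = true ↔ ∃ p ∈ idiomPatterns, p.toList <:+: cs := by
  induction cs with
  | nil =>
    simp only [idiomScanB, Bool.false_eq_true, false_iff]
    rintro ⟨p, hp, hinf⟩
    exact idiomPatterns_ne_nil p hp (List.eq_nil_of_infix_nil hinf)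
  | cons c rest ih =>
    simp only [idiomScanB, Bool.or_eq_true, List.any_eq_true, ih]
    constructor
    · rintro (⟨p, hp, hpre⟩ | ⟨p, hp, hinf⟩)
      · exact ⟨p, hp, (List.isPrefixOf_iff_prefix.mp hpre).isInfix⟩
      · exact ⟨p, hp, List.infix_cons hinf⟩
    · rintro ⟨p, hp, hinf⟩
      rcases List.infix_cons_iff.mp hinf with hpre | hinf'
      · exact Or.inl ⟨p, hp, List.isPrefixOf_iff_prefix.mpr hpre⟩
      · exact Or.inr ⟨p, hp, hinf'⟩

-- ===== VERDICT (by name: the statement is the Claim_ definition above) =====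
theorem idiom_detection_score_py_spec : Claim_equal_idiom_detection_score_py := by
  intro text _
  unfold Spec_idiom_detection_score_py idiom_detection_score_py idiom_detection_score_py_alt
  by_cases h : text == ""
  · simp [h]
  · have key : (idiomPatterns.any fun p => PySem.Str.isIn p (PySem.Str.lower text))
        = idiomScanB (PySem.Str.lower text).toList := by
      rw [Bool.eq_iff_iff, List.any_eq_true, idiomScanB_iff]
      constructor <;> rintro ⟨p, hp, hx⟩
      · exact ⟨p, hp, (PySem.Chars.isIn_iff_infix _ _).mp ((PySem.Str.isIn_eq p _) ▸ hx)⟩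
      · exact ⟨p, hp, (PySem.Str.isIn_eq p _) ▸ (PySem.Chars.isIn_iff_infix _ _).mpr hx⟩
    simp only [h, idiomLoopA_eq, key]
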